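-- pv_equiv track=rewrite | github.com/LucasPennice/simulaciontp1.2 | tp2.py | calcular_rachas_de_derrota
-- ===== SOURCE A (Python) =====
-- def calcular_rachas_de_derrota(historial):
--     rachas = []
--     racha_actual = 0
--
--     for i in range(1, len(historial)):
--         if historial[i] < historial[i - 1]:  # Si pierdes
--             racha_actual += 1
--         else:  # Si ganas
--             if racha_actual > 0:
--                 rachas.append(racha_actual)  # Agregar la racha actual a la lista
--             racha_actual = 0  # Reiniciar la racha
--
--     # Si la última racha no se reinició (porque el historial terminó con derrotas)
--     if racha_actual > 0:
--         rachas.append(racha_actual)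
--
--     return rachas
-- ===== SOURCE B (Python) =====
-- def calcular_rachas_de_derrota(historial):
--     # derive the adjacent-comparison list, then scan it run by run (two pointers)
--     losses = [b < a for a, b in zip(historial, historial[1:])]
--     rachas = []
--     i, n = 0, len(losses)
--     while i < n:
--         j = i + 1
--         while j < n and losses[j] == losses[i]:
--             j += 1
--         if losses[i]:
--             rachas.append(j - i)
--         i = j
--     return rachas
-- ===== Notes on version B (the rewrite author's own statement) =====
-- stated objective: alternative
-- what changed: B first builds the list of adjacent loss comparisons and then groups it into maximal runs with a two-pointer scan, emitting each True-run length, instead of A's single index loop with a running counter and a trailing flush.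
import Mathlib
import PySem

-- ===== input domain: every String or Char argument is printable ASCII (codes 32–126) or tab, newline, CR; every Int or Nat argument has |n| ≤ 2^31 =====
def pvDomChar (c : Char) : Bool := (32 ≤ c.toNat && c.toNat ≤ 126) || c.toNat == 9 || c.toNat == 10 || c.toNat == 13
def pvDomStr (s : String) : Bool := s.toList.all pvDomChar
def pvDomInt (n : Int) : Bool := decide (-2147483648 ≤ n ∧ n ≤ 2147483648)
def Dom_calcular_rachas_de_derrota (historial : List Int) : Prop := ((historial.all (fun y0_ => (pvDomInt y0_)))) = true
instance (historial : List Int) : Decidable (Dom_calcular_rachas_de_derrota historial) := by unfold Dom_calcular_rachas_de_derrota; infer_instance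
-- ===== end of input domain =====

-- B replaces A's running-counter loop by a derive-then-group pipeline (adjacent comparison list,
-- then a run-length scan emitting True-run lengths); alternative decomposition, same cost.
-- ===== PORT A =====
-- A: one pass over indices 1..len-1 with a running streak counter and a final flush.
def calcular_rachas_de_derrota (historial : List Int) : List Int :=
  let res := (PySem.List.pyRange 1 (PySem.List.len historial) 1).foldl
    (fun (st : List Int × Int) i =>
      if PySem.List.pyGetD historial i 0 < PySem.List.pyGetD historial (i - 1) 0 then
        (st.1, st.2 + 1)
      else
        if st.2 > 0 then (st.1 ++ [st.2], 0) else (st.1, 0))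
    ([], 0)
  if res.2 > 0 then res.1 ++ [res.2] else res.1

-- ===== PORT B =====
-- B: build the adjacent loss-comparison list, then scan it run by run (two-pointer grouping),
-- emitting the length of each True run.
def pvRuns : List Bool -> List Int
  | [] => []
  | b :: rest =>
      let t := rest.takeWhile (fun x => x == b)
      let d := rest.dropWhile (fun x => x == b)
      if b then (1 + (t.length : Int)) :: pvRuns d else pvRuns d
termination_by bs => bs.length
decreasing_by
  all_goals
  simp only [List.length_cons]
  have := List.length_dropWhile_le (fun x => x == b) rest
  omega

def calcular_rachas_de_derrota_alt (historial : List Int) : List Int :=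
  pvRuns (List.zipWith (fun a b => decide (b < a)) historial historial.tail)

-- ===== PRECONDITION & SPEC =====
def Spec_calcular_rachas_de_derrota (historial : List Int) (out : List Int) : Prop := out = calcular_rachas_de_derrota_alt historial
instance (historial : List Int) (out : List Int) : Decidable (Spec_calcular_rachas_de_derrota historial out) := by unfold Spec_calcular_rachas_de_derrota; infer_instance

-- ===== CLAIM (what is proved, stated in full; the proofs are below) =====
def Claim_equal_calcular_rachas_de_derrota : Prop := ∀ (historial : List Int), Dom_calcular_rachas_de_derrota historial → Spec_calcular_rachas_de_derrota historial (calcular_rachas_de_derrota historial)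

-- ===== LEMMAS AND PROOFS =====

-- ===== VERDICT (by name: the statement is the Claim_ definition above) =====
-- step function of A's loop, on the comparison Bool instead of the index
def pvStep (st : List Int × Int) (b : Bool) : List Int × Int :=
  if b then (st.1, st.2 + 1)
  else if st.2 > 0 then (st.1 ++ [st.2], 0) else (st.1, 0)

def pvFlush (st : List Int × Int) : List Int :=
  if st.2 > 0 then st.1 ++ [st.2] else st.1

-- reference recursion: result of the remaining scan given the current streak length k
def pvSpec : List Bool -> Int -> List Int
  | [], k => if k > 0 then [k] else []
  | true :: bs, k => pvSpec bs (k + 1)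
  | false :: bs, k => (if k > 0 then [k] else []) ++ pvSpec bs 0


theorem flush_fold_spec (bs : List Bool) : ∀ (acc : List Int) (k : Int),
    pvFlush (bs.foldl pvStep (acc, k)) = acc ++ pvSpec bs k := by
  induction bs with
  | nil =>
    intro acc k
    simp only [List.foldl_nil, pvFlush, pvSpec]
    split_ifs <;> simp
  | cons b bs ih =>
    intro acc k
    cases b with
    | true => simpa [pvStep, pvSpec] using ih acc (k+1)
    | false =>
      rw [List.foldl_cons,
        show pvStep (acc, k) false = if k > 0 then (acc ++ [k], 0) else (acc, 0) from rfl,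
        show pvSpec (false :: bs) k = (if k > 0 then [k] else []) ++ pvSpec bs 0 from rfl]
      split_ifs with hk
      · rw [ih]; simp
      · rw [ih]; simp

theorem spec_trues (t : List Bool) : ∀ (bs : List Bool) (k : Int), (∀ b ∈ t, b = true) →
    pvSpec (t ++ bs) k = pvSpec bs (k + t.length) := by
  induction t with
  | nil => intro bs k _; simp
  | cons b t ih =>
    intro bs k h
    have hb : b = true := h b (by simp)
    subst hb
    rw [List.cons_append]
    show pvSpec (t ++ bs) (k + 1) = _
    rw [ih bs (k+1) (fun x hx => h x (by simp [hx]))]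
    congr 1
    simp only [List.length_cons]
    push_cast
    ring

theorem spec_falses (t : List Bool) : ∀ (bs : List Bool), (∀ b ∈ t, b = false) →
    pvSpec (t ++ bs) 0 = pvSpec bs 0 := by
  induction t with
  | nil => intro bs _; simp
  | cons b t ih =>
    intro bs h
    have hb : b = false := h b (by simp)
    subst hb
    rw [List.cons_append]
    show (if (0:Int) > 0 then [(0:Int)] else []) ++ pvSpec (t ++ bs) 0 = _
    rw [ih bs (fun x hx => h x (by simp [hx]))]
    simp

theorem spec_pos_not_head_true (d : List Bool) (m : Int) (hm : 0 < m) (hd : d.head? ≠ some true) :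
    pvSpec d m = m :: pvSpec d 0 := by
  cases d with
  | nil => simp [pvSpec, hm]
  | cons b bs =>
    cases b with
    | true => simp at hd
    | false => simp [pvSpec, hm]

theorem head?_dropWhile_false (p : Bool → Bool) (l : List Bool) (b : Bool) :
    (l.dropWhile p).head? = some b → p b = false := by
  induction l with
  | nil => simp [List.dropWhile]
  | cons c cs ih =>
    simp only [List.dropWhile]
    by_cases hc : p c
    · simp only [hc]; exact ih
    · simp [hc]; rintro rfl; simpa using hc

theorem runs_spec (bs : List Bool) : pvRuns bs = pvSpec bs 0 := by
  cases bs with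
  | nil => simp [pvRuns, pvSpec]
  | cons b rest =>
    rw [pvRuns]
    have hsplit : rest.takeWhile (fun x => x == b) ++ rest.dropWhile (fun x => x == b) = rest :=
      List.takeWhile_append_dropWhile
    have ihd := runs_spec (rest.dropWhile (fun x => x == b))
    cases b with
    | true =>
      show (1 + ((rest.takeWhile (fun x => x == true)).length : Int)) ::
          pvRuns (rest.dropWhile (fun x => x == true)) = pvSpec (true :: rest) 0
      have ht : ∀ x ∈ rest.takeWhile (fun x => x == true), x = true := by
        intro x hx
        simpa using List.mem_takeWhile_imp hx
      have hd : (rest.dropWhile (fun x => x == true)).head? ≠ some true := by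
        intro hc
        simpa using head?_dropWhile_false (fun x => x == true) rest true hc
      have hs1 := spec_trues (rest.takeWhile (fun x => x == true))
        (rest.dropWhile (fun x => x == true)) (0 + 1) ht
      rw [hsplit] at hs1
      rw [show pvSpec (true :: rest) 0 = pvSpec rest (0 + 1) from rfl, hs1,
          spec_pos_not_head_true _ _ (by positivity) hd, ihd]
      norm_num
    | false =>
      show pvRuns (rest.dropWhile (fun x => x == false)) = pvSpec (false :: rest) 0
      have ht : ∀ x ∈ rest.takeWhile (fun x => x == false), x = false := by
        intro x hx
        simpa using List.mem_takeWhile_imp hx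
      have hs2 := spec_falses (rest.takeWhile (fun x => x == false))
        (rest.dropWhile (fun x => x == false)) ht
      rw [hsplit] at hs2
      rw [show pvSpec (false :: rest) 0 = (if (0:Int) > 0 then [(0:Int)] else []) ++ pvSpec rest 0 from rfl,
          hs2, ihd]
      simp
termination_by bs.length
decreasing_by
  all_goals
  simp only [List.length_cons]
  have := List.length_dropWhile_le (fun x => x == b) rest
  omega

theorem pvGetD_cons_shift (x : Int) (xs : List Int) (i : Int) (h : 1 <= i) :
    PySem.List.pyGetD (x :: xs) i 0 = PySem.List.pyGetD xs (i - 1) 0 := by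
  obtain ⟨n, rfl⟩ : ∃ n : Nat, i = (n:Int) := ⟨i.toNat, by omega⟩
  cases n with
  | zero => omega
  | succ m =>
    have h1 : ((m+1 : Nat):Int) - 1 = ((m : Nat):Int) := by push_cast; ring
    rw [h1, PySem.List.pyGetD_natCast, PySem.List.pyGetD_natCast, List.getD_cons_succ]

theorem pvRange_shift (a b : Int) :
    PySem.List.pyRange (a+1) (b+1) 1 = (PySem.List.pyRange a b 1).map (· + 1) := by
  by_cases hab : b ≤ a
  · rw [PySem.List.pyRange_one_eq_nil (by omega), PySem.List.pyRange_one_eq_nil hab]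
    rfl
  · have : PySem.List.pyRange a b 1 = a :: PySem.List.pyRange (a+1) b 1 :=
      PySem.List.pyRange_one_cons (by omega)
    rw [this, PySem.List.pyRange_one_cons (by omega : a+1 < b+1), List.map_cons]
    exact List.cons_eq_cons.mpr ⟨rfl, pvRange_shift (a+1) b⟩
termination_by (b - a).toNat
decreasing_by omega

theorem adj_map (x : Int) (xs : List Int) :
    (PySem.List.pyRange 1 (PySem.List.len (x :: xs)) 1).map
      (fun i => decide (PySem.List.pyGetD (x :: xs) i 0 < PySem.List.pyGetD (x :: xs) (i - 1) 0))
      = List.zipWith (fun a b => decide (b < a)) (x :: xs) xs := by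
  induction xs generalizing x with
  | nil =>
    rw [show PySem.List.len [x] = 1 by rfl, PySem.List.pyRange_one_eq_nil (by omega)]
    rfl
  | cons y ys ih =>
    have hlen : PySem.List.len (x :: y :: ys) = (PySem.List.len (y :: ys)) + 1 := by
      simp [PySem.List.len_eq]
    have hpos : (0:Int) < PySem.List.len (y :: ys) := by simp [PySem.List.len_eq]
    rw [hlen, PySem.List.pyRange_one_cons (by omega)]
    simp only [List.map_cons]
    have hhead : decide (PySem.List.pyGetD (x :: y :: ys) 1 0
        < PySem.List.pyGetD (x :: y :: ys) (1 - 1) 0) = decide (y < x) := by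
      norm_num [PySem.List.pyGetD_zero_cons]
      rw [show ((1:Int)) = ((1:Nat):Int) by rfl, PySem.List.pyGetD_natCast]
      rfl
    rw [hhead]
    have hshift : PySem.List.pyRange (1+1) (PySem.List.len (y :: ys) + 1) 1
        = (PySem.List.pyRange 1 (PySem.List.len (y :: ys)) 1).map (· + 1) := pvRange_shift 1 _
    rw [hshift, List.map_map]
    have hcong : ∀ i ∈ PySem.List.pyRange 1 (PySem.List.len (y :: ys)) 1,
        decide (PySem.List.pyGetD (x :: y :: ys) (i+1) 0 < PySem.List.pyGetD (x :: y :: ys) (i+1-1) 0)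
        = decide (PySem.List.pyGetD (y :: ys) i 0 < PySem.List.pyGetD (y :: ys) (i-1) 0) := by
      intro i hi
      have h1i : 1 ≤ i := by
        have := PySem.List.mem_pyRange_one.mp hi
        omega
      rw [pvGetD_cons_shift x (y :: ys) (i+1) (by omega)]
      have h2 : i + 1 - 1 = i := by ring
      rw [h2, pvGetD_cons_shift x (y :: ys) i (by omega)]
    simp only [Function.comp_def]
    rw [List.map_congr_left hcong, ih y]
    rfl

theorem foldA_eq (l : List Int) :
    calcular_rachas_de_derrota l
      = pvFlush ((List.zipWith (fun a b => decide (b < a)) l l.tail).foldl pvStep ([], 0)) := by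
  cases l with
  | nil => rfl
  | cons x xs =>
    show pvFlush ((PySem.List.pyRange 1 (PySem.List.len (x :: xs)) 1).foldl _ ([], 0)) = _
    rw [List.tail_cons, ← adj_map x xs, List.foldl_map]
    congr 1
    congr 1
    funext st i
    simp [pvStep]

theorem calcular_rachas_de_derrota_spec : Claim_equal_calcular_rachas_de_derrota := by
  intro l _
  unfold Spec_calcular_rachas_de_derrota calcular_rachas_de_derrota_alt
  rw [foldA_eq, flush_fold_spec, runs_spec]
  simp
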